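-- pv_equiv track=rewrite | github.com/shakesBeardZ/biolcip-2 | tools/eval_checkpoints.py | build_mapping
-- ===== SOURCE A (Python) =====
-- from typing import Dict, Iterable, List, Tuple
--
-- def build_mapping(names: list, rank: str, allowed_labels: List[str], rank_only: bool) -> Tuple[Dict[str, List[int]], List[str]]:
--     level_map = {"kingdom":0,"phylum":1,"cls":2,"class":2,"order":3,"family":4,"genus":5,"species":6}
--     idx = level_map[rank]
--
--     def aggregated_label(entry):
--         tax = entry[0]
--         if rank_only:
--             if idx == 6 and len(tax) >= 7:
--                 return f"{tax[5]} {tax[6]}".strip()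
--             return tax[idx]
--         else:
--             if idx == 6 and len(tax) >= 7:
--                 return " ".join(tax[:6] + [f"{tax[5]} {tax[6]}"])
--             return " ".join(tax[:idx+1])
--
--     label_per_species = [aggregated_label(e) for e in names]
--     mapping = {}
--     for i, lab in enumerate(label_per_species):
--         mapping.setdefault(lab, []).append(i)
--
--     allowed = set(allowed_labels)
--     mapping = {lab: idxs for lab, idxs in mapping.items() if lab in allowed}
--     label_order = [lab for lab in allowed_labels if lab in mapping]
--     return mapping, label_order
-- ===== SOURCE B (Python) =====
-- def build_mapping(names, rank, allowed_labels, rank_only):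
--     level_map = {"kingdom": 0, "phylum": 1, "cls": 2, "class": 2,
--                  "order": 3, "family": 4, "genus": 5, "species": 6}
--     idx = level_map[rank]
--
--     def aggregated_label(entry):
--         tax = entry[0]
--         if rank_only:
--             if idx == 6 and len(tax) >= 7:
--                 return f"{tax[5]} {tax[6]}".strip()
--             return tax[idx]
--         else:
--             if idx == 6 and len(tax) >= 7:
--                 return " ".join(tax[:6] + [f"{tax[5]} {tax[6]}"])
--             return " ".join(tax[:idx + 1])
--
--     labels = [aggregated_label(e) for e in names]
--     allowed = set(allowed_labels)
--     # per-label grouping: for each distinct label (first-occurrence order) that is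
--     # allowed, collect its indices with a full scan -- no incremental dict grouping
--     mapping = {lab: [i for i, l in enumerate(labels) if l == lab]
--                for lab in dict.fromkeys(labels) if lab in allowed}
--     label_order = [lab for lab in allowed_labels if lab in mapping]
--     return mapping, label_order
-- ===== Notes on version B (the rewrite author's own statement) =====
-- stated objective: alternative
-- what changed: B drops A's incremental setdefault hash-grouping: it deduplicates the label list (dict.fromkeys) and builds each allowed group by a separate full scan over the enumerated labels, a per-label repeated-scan algorithm instead of a single-pass dict accumulation followed by a filtering comprehension.
import Mathlib
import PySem

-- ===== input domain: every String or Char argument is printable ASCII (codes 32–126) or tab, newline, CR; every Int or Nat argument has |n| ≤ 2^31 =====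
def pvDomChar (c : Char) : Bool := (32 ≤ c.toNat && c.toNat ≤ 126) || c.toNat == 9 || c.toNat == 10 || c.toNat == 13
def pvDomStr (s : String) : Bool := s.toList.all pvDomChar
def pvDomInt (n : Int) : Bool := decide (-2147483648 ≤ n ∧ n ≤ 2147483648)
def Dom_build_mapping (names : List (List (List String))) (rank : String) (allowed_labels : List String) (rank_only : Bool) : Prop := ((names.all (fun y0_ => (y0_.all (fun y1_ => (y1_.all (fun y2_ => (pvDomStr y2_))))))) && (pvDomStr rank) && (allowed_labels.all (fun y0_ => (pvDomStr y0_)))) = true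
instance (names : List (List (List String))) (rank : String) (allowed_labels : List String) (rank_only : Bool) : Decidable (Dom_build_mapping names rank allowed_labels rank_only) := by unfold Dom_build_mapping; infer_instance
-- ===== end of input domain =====

-- B replaces A's single-pass setdefault hash-grouping with dedup of the label list plus a
-- separate full scan per allowed distinct label (objective: alternative, same outputs).

-- shared constant: the Python dict literal level_map (both sources contain the same literal)
def levelMap : PySem.Dict String Int :=
  PySem.Dict.ofList [("kingdom", 0), ("phylum", 1), ("cls", 2), ("class", 2),
                     ("order", 3), ("family", 4), ("genus", 5), ("species", 6)]

-- shared helper aggregated_label(entry) (copied verbatim between the two Pythons);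
-- entry[0] / tax[idx] are total pyGetD only because Pre_build_mapping puts every index in range
def aggregatedLabel (idx : Int) (rank_only : Bool) (entry : List (List String)) : String :=
  let tax := PySem.List.pyGetD entry 0 []
  if rank_only then
    if idx = 6 ∧ 7 ≤ tax.length then
      PySem.Str.strip (PySem.Str.join " " [PySem.List.pyGetD tax 5 "", PySem.List.pyGetD tax 6 ""])
    else
      PySem.List.pyGetD tax idx ""
  else
    if idx = 6 ∧ 7 ≤ tax.length then
      PySem.Str.join " " (PySem.List.slice tax none (some 6) ++
        [PySem.Str.join " " [PySem.List.pyGetD tax 5 "", PySem.List.pyGetD tax 6 ""]])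
    else
      PySem.Str.join " " (PySem.List.slice tax none (some (idx + 1)))

-- ===== PORT A =====
def build_mapping (names : List (List (List String))) (rank : String) (allowed_labels : List String) (rank_only : Bool) : (List (String × List Int)) × List String :=
  let idx := levelMap.getD rank 0
  let label_per_species := names.map (aggregatedLabel idx rank_only)
  let mapping := (PySem.List.enumerate label_per_species).foldl
      (fun d p => d.modify p.2 [] (· ++ [p.1])) PySem.Dict.empty
  let allowed : PySem.Set String := PySem.Set.ofList allowed_labels
  let mapping2 := PySem.Dict.mk (mapping.items.filter (fun p => allowed.contains p.1))
  let label_order := allowed_labels.filter (fun lab => mapping2.contains lab)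
  (mapping2.items, label_order)

-- ===== PORT B =====
def build_mapping_alt (names : List (List (List String))) (rank : String) (allowed_labels : List String) (rank_only : Bool) : (List (String × List Int)) × List String :=
  let idx := levelMap.getD rank 0
  let labels := names.map (aggregatedLabel idx rank_only)
  let allowed : PySem.Set String := PySem.Set.ofList allowed_labels
  -- {lab: [i for i,l in enumerate(labels) if l == lab] for lab in dict.fromkeys(labels) if lab in allowed}
  let mapping := PySem.Dict.mk
      (((PySem.List.dedup labels).filter (fun lab => allowed.contains lab)).map
        (fun lab => (lab, ((PySem.List.enumerate labels).filter (fun p => p.2 == lab)).map (·.1))))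
  let label_order := allowed_labels.filter (fun lab => mapping.contains lab)
  (mapping.items, label_order)

-- ===== PRECONDITION & SPEC =====
-- Pre_ excludes exactly the inputs where the Python A raises: KeyError when rank is not a
-- key of level_map, and IndexError when some entry is empty (entry[0]) or, with rank_only,
-- some taxonomy is too short for tax[idx].
def Pre_build_mapping (names : List (List (List String))) (rank : String) (allowed_labels : List String) (rank_only : Bool) : Prop :=
  levelMap.contains rank = true ∧
  ∀ e ∈ names, e ≠ [] ∧ (rank_only = true → (levelMap.getD rank 0).toNat < (PySem.List.pyGetD e 0 []).length)
instance (names : List (List (List String))) (rank : String) (allowed_labels : List String) (rank_only : Bool) : Decidable (Pre_build_mapping names rank allowed_labels rank_only) := by unfold Pre_build_mapping; infer_instance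

def pvWitness_build_mapping : List (List (List String)) × String × List String × Bool :=
  ([[["a", "b", "c", "d", "e", "f", "g"]], [["a", "b", "c", "d", "e", "f", "h"]]],
   "species", ["f g", "q"], true)

def Spec_build_mapping (names : List (List (List String))) (rank : String) (allowed_labels : List String) (rank_only : Bool) (out : (List (String × List Int)) × List String) : Prop := out = build_mapping_alt names rank allowed_labels rank_only
instance (names : List (List (List String))) (rank : String) (allowed_labels : List String) (rank_only : Bool) (out : (List (String × List Int)) × List String) : Decidable (Spec_build_mapping names rank allowed_labels rank_only out) := by unfold Spec_build_mapping; infer_instance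

-- ===== CLAIM (what is proved, stated in full; the proofs are below) =====
def Claim_equal_build_mapping : Prop := ∀ (names : List (List (List String))) (rank : String) (allowed_labels : List String) (rank_only : Bool), Dom_build_mapping names rank allowed_labels rank_only → Pre_build_mapping names rank allowed_labels rank_only → Spec_build_mapping names rank allowed_labels rank_only (build_mapping names rank allowed_labels rank_only)

-- ===== LEMMAS AND PROOFS =====

theorem pv_map_snd_enumerate {β : Type} (xs : List β) (s : Int) :
    (PySem.List.enumerate xs s).map (·.2) = xs := by
  induction xs generalizing s with
  | nil => simp [PySem.List.enumerate_nil]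
  | cons x t ih => simp [PySem.List.enumerate_cons, ih]

-- characterisation of A's grouping fold: its items are, for each distinct key in
-- first-occurrence order, the key paired with the indices carrying that key
theorem pv_group_items (l : List (Int × String)) :
    (l.foldl (fun d p => d.modify p.2 [] (· ++ [p.1])) PySem.Dict.empty).items
      = (PySem.Set.ofList (l.map (·.2))).map
          (fun k => (k, (l.filter (fun p => p.2 == k)).map (·.1))) := by
  rw [show (fun (d : PySem.Dict String (List Int)) (p : Int × String) => d.modify p.2 [] (· ++ [p.1]))
        = (fun d p => d.modify ((fun q : Int × String => q.2) p) [] ((fun (_ : PySem.Dict String (List Int)) (q : Int × String) => (fun cur => cur ++ [q.1])) d p)) from rfl]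
  rw [PySem.Dict.items_eq_map_keys _ (PySem.Dict.nodup_keys_foldl_modify_key l (fun q : Int × String => q.2) [] _ PySem.Dict.empty (by simp [PySem.Dict.keys_empty])) []]
  rw [PySem.Dict.keys_foldl_modify_key]
  have hkeys : PySem.Set.update (PySem.Dict.empty : PySem.Dict String (List Int)).keys (l.map fun q : Int × String => q.2)
      = PySem.Set.ofList (l.map (·.2)) := by
    simp [PySem.Dict.keys_empty, PySem.Set.update_nil_left]
  rw [hkeys]
  apply List.map_eq_map_iff.mpr
  intro k hk
  congr 1
  have hsw : l.foldl (fun d p => d.modify ((fun q : Int × String => q.2) p) [] ((· ++ [p.1]))) PySem.Dict.empty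
      = (l.map (fun p => (p.2, p.1))).foldl (fun d q => d.modify q.1 [] (· ++ [q.2])) PySem.Dict.empty := by
    rw [List.foldl_map]
  rw [hsw, PySem.Dict.getD_foldl_modify_append]
  simp [PySem.Dict.getD_empty, List.filter_map, Function.comp_def]

theorem main_eq (names : List (List (List String)))
    (rank : String) (allowed_labels : List String) (rank_only : Bool) :
    build_mapping names rank allowed_labels rank_only
      = build_mapping_alt names rank allowed_labels rank_only := by
  unfold build_mapping build_mapping_alt
  simp only []
  set labels := names.map (aggregatedLabel (levelMap.getD rank 0) rank_only) with hlabels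
  have hitems :
      (((PySem.List.enumerate labels).foldl
          (fun (d : PySem.Dict String (List Int)) p => d.modify p.2 [] (· ++ [p.1]))
          PySem.Dict.empty).items.filter
        (fun p => (PySem.Set.ofList allowed_labels).contains p.1))
      = ((PySem.List.dedup labels).filter (fun lab => (PySem.Set.ofList allowed_labels).contains lab)).map
          (fun lab => (lab, ((PySem.List.enumerate labels).filter (fun p => p.2 == lab)).map (·.1))) := by
    rw [pv_group_items, pv_map_snd_enumerate, List.filter_map, PySem.List.dedup_eq_ofList]
    rfl
  rw [hitems]

-- ===== VERDICT (by name: the statement is the Claim_ definition above) =====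
theorem build_mapping_spec : Claim_equal_build_mapping := by
  intro names rank allowed_labels rank_only _ _
  unfold Spec_build_mapping
  exact main_eq names rank allowed_labels rank_only
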